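-- pv_equiv track=rewrite | github.com/BMaxV/economy_collection | economy_collection/crafting.py | sum_objects_by_common_purpose
-- ===== SOURCE A (Python) =====
-- def sum_objects_by_common_purpose(inventory_like_dict,groups=None):
--
--     if groups == None:
--         groups = {"Food":["Bread","Fish"],
--                 "Consumer Goods":["Clothing"], # clothing could be it's own thing.
--                 "Tools":["Hammer","Shovel"]}
--
--     my_sum = {}
--     for name in inventory_like_dict:
--         for group_name in groups:
--             if name in groups[group_name]:
--                 if group_name not in my_sum:
--                     my_sum[group_name] = 0
--                 my_sum[group_name] += inventory_like_dict[name]["amount"]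
--
--     return my_sum
-- ===== SOURCE B (Python) =====
-- def sum_objects_by_common_purpose(inventory_like_dict, groups=None):
--     if groups is None:
--         groups = {"Food": ["Bread", "Fish"],
--                   "Consumer Goods": ["Clothing"],
--                   "Tools": ["Hammer", "Shovel"]}
--     # reverse index: item name -> group names (groups order, each group once)
--     index = {}
--     for group_name, members in groups.items():
--         for member in dict.fromkeys(members):
--             index.setdefault(member, []).append(group_name)
--     my_sum = {}
--     for name, data in inventory_like_dict.items():
--         for group_name in index.get(name, ()):
--             my_sum[group_name] = my_sum.get(group_name, 0) + data["amount"]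
--     return my_sum
-- ===== Notes on version B (the rewrite author's own statement) =====
-- stated objective: faster
-- what changed: B precomputes a reverse index from item name to its groups once, then does a single indexed pass over the inventory, instead of A's scan of every group's member list for every inventory item.
import Mathlib
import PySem

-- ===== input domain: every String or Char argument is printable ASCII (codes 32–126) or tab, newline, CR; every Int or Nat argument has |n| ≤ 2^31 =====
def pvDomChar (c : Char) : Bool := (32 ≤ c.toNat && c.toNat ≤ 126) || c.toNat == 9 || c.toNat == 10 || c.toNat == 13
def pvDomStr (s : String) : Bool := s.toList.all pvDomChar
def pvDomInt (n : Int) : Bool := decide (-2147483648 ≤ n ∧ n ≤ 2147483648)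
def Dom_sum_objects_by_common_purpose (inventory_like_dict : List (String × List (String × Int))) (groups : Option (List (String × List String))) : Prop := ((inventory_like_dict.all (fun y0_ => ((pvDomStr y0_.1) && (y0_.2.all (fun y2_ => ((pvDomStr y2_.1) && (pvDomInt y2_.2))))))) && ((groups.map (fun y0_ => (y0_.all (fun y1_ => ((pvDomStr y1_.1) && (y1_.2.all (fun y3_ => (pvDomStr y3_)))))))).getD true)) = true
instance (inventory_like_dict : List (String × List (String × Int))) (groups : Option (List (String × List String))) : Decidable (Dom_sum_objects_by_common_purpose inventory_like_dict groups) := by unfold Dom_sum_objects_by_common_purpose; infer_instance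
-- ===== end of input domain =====

-- B replaces A's per-item scan of every group's member list by a reverse index (item name → its
-- groups) built once, then one indexed pass over the inventory (intended to be asymptotically faster).

-- the default value of the 'groups' parameter (shared constant data of both ports)
def pvDefaultGroups : List (String × List String) :=
  [("Food", ["Bread", "Fish"]), ("Consumer Goods", ["Clothing"]), ("Tools", ["Hammer", "Shovel"])]

-- ===== PORT A =====
-- literal port of A: for each inventory key, scan every group and test list membership;
-- dicts are PySem.Dict built from the association lists (Python dict = dedup, last value wins).
def sum_objects_by_common_purpose (inventory_like_dict : List (String × List (String × Int))) (groups : Option (List (String × List String))) : List (String × Int) :=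
  let gl := groups.getD pvDefaultGroups
  let g := PySem.Dict.ofList gl
  let invd := PySem.Dict.ofList inventory_like_dict
  (invd.keys.foldl (fun s name =>
      g.keys.foldl (fun s gname =>
        if (g.getD gname []).contains name then
          let s1 := if s.contains gname then s else s.insert gname (0 : Int)
          -- inventory_like_dict[name]["amount"]; under Pre_ the key "amount" is present (getD exact there)
          s1.insert gname (s1.getD gname 0 + (PySem.Dict.ofList (invd.getD name [])).getD "amount" 0)
        else s) s) PySem.Dict.empty).items

-- ===== PORT B =====
-- literal port of B: build the reverse index item → group names, then one pass over the inventory items.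
def sum_objects_by_common_purpose_alt (inventory_like_dict : List (String × List (String × Int))) (groups : Option (List (String × List String))) : List (String × Int) :=
  let gl := groups.getD pvDefaultGroups
  let g := PySem.Dict.ofList gl
  let index := g.items.foldl (fun idx p =>
      (PySem.List.dedup p.2).foldl (fun idx m => idx.modify m ([] : List String) (· ++ [p.1])) idx)
    PySem.Dict.empty
  ((PySem.Dict.ofList inventory_like_dict).items.foldl (fun s q =>
      (index.getD q.1 []).foldl (fun s gname =>
        s.insert gname (s.getD gname 0 + (PySem.Dict.ofList q.2).getD "amount" 0)) s)
    PySem.Dict.empty).items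

-- ===== PRECONDITION & SPEC =====
-- Pre_ excludes exactly the inputs where Python A raises KeyError: an inventory entry whose name
-- belongs to some group but whose inner dict has no "amount" key.
def Pre_sum_objects_by_common_purpose (inventory_like_dict : List (String × List (String × Int))) (groups : Option (List (String × List String))) : Prop :=
  ∀ p ∈ (PySem.Dict.ofList inventory_like_dict).items,
    (∃ gr ∈ (PySem.Dict.ofList (groups.getD pvDefaultGroups)).items, p.1 ∈ gr.2) →
    "amount" ∈ p.2.map Prod.fst
instance (inventory_like_dict : List (String × List (String × Int))) (groups : Option (List (String × List String))) : Decidable (Pre_sum_objects_by_common_purpose inventory_like_dict groups) := by unfold Pre_sum_objects_by_common_purpose; infer_instance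

def pvWitness_sum_objects_by_common_purpose : (List (String × List (String × Int))) × (Option (List (String × List String))) :=
  ([("Bread", [("amount", 3)]), ("Nail", [])], none)

def Spec_sum_objects_by_common_purpose (inventory_like_dict : List (String × List (String × Int))) (groups : Option (List (String × List String))) (out : List (String × Int)) : Prop := out = sum_objects_by_common_purpose_alt inventory_like_dict groups
instance (inventory_like_dict : List (String × List (String × Int))) (groups : Option (List (String × List String))) (out : List (String × Int)) : Decidable (Spec_sum_objects_by_common_purpose inventory_like_dict groups out) := by unfold Spec_sum_objects_by_common_purpose; infer_instance

-- ===== CLAIM (what is proved, stated in full; the proofs are below) =====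
def Claim_equal_sum_objects_by_common_purpose : Prop := ∀ (inventory_like_dict : List (String × List (String × Int))) (groups : Option (List (String × List String))), Dom_sum_objects_by_common_purpose inventory_like_dict groups → Pre_sum_objects_by_common_purpose inventory_like_dict groups → Spec_sum_objects_by_common_purpose inventory_like_dict groups (sum_objects_by_common_purpose inventory_like_dict groups)

-- ===== LEMMAS AND PROOFS =====

-- a nodup list filtered by equality with a: the singleton [a] if present, else []
lemma nodup_filter_beq (l : List String) (h : l.Nodup) (a : String) :
    l.filter (· == a) = if a ∈ l then [a] else [] := by
  induction l with
  | nil => simp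
  | cons x xs ih =>
    simp only [List.nodup_cons] at h
    by_cases hx : x = a
    · subst hx
      simp [ih h.2, h.1]
    · simp [hx, ih h.2, List.mem_cons, Ne.symm hx]

-- flatMap of a 0/1-valued function is filter-then-map
lemma flatMap_if_singleton {α β : Type} (l : List α) (p : α → Bool) (f : α → β) :
    l.flatMap (fun a => if p a then [f a] else []) = (l.filter p).map f := by
  induction l with
  | nil => rfl
  | cons x xs ih =>
    by_cases hx : p x <;> simp [hx, ih]

-- the reverse index of B, looked up at `name`, is exactly the (ordered) list of group names whose
-- member list contains `name`
lemma index_getD (g : PySem.Dict String (List String)) (name : String) :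
    (g.items.foldl (fun idx p =>
        (PySem.List.dedup p.2).foldl (fun idx m => idx.modify m ([] : List String) (· ++ [p.1])) idx)
      PySem.Dict.empty).getD name []
    = (g.items.filter (fun p => p.2.contains name)).map Prod.fst := by
  have hflat : ∀ (items : List (String × List String)) (d : PySem.Dict String (List String)),
      items.foldl (fun idx p =>
        (PySem.List.dedup p.2).foldl (fun idx m => idx.modify m ([] : List String) (· ++ [p.1])) idx) d
      = (items.flatMap (fun p => (PySem.List.dedup p.2).map (fun m => (m, p.1)))).foldl
          (fun d q => d.modify q.1 ([] : List String) (· ++ [q.2])) d := by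
    intro items d
    rw [List.foldl_flatMap]
    simp only [List.foldl_map]
  rw [hflat, PySem.Dict.getD_foldl_modify_append, PySem.Dict.getD_empty]
  simp only [List.nil_append, List.filter_flatMap, List.map_flatMap]
  have hper : ∀ p : String × List String,
      (((PySem.List.dedup p.2).map (fun m => (m, p.1))).filter (fun q => q.1 == name)).map Prod.snd
      = (if p.2.contains name then [p.1] else []) := by
    intro p
    rw [List.filter_map]
    have : ((fun q : String × String => q.1 == name) ∘ fun m => (m, p.1)) = (· == name) := rfl
    rw [this, nodup_filter_beq _ (PySem.List.nodup_dedup p.2) name]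
    by_cases h : name ∈ p.2
    · simp [h]
    · simp [h]
  calc (g.items.flatMap fun p =>
          (((PySem.List.dedup p.2).map (fun m => (m, p.1))).filter (fun q => q.1 == name)).map Prod.snd)
      = g.items.flatMap (fun p => if p.2.contains name then [p.1] else []) := by
        exact List.flatMap_congr (fun p _ => hper p)
    _ = (g.items.filter (fun p => p.2.contains name)).map Prod.fst := by
        exact flatMap_if_singleton _ _ _

-- A's scan over all group keys equals B's fold over the reverse-index entry for `name`
lemma inner_eq (g : PySem.Dict String (List String)) (hg : g.keys.Nodup) (name : String) (amt : Int)
    (s : PySem.Dict String Int) :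
    g.keys.foldl (fun s gname =>
        if (g.getD gname []).contains name then
          let s1 := if s.contains gname then s else s.insert gname (0 : Int)
          s1.insert gname (s1.getD gname 0 + amt)
        else s) s
    = ((g.items.filter (fun p => p.2.contains name)).map Prod.fst).foldl
        (fun s gname => s.insert gname (s.getD gname 0 + amt)) s := by
  have hbody : (fun (s : PySem.Dict String Int) gname =>
        if (g.getD gname []).contains name then
          let s1 := if s.contains gname then s else s.insert gname (0 : Int)
          s1.insert gname (s1.getD gname 0 + amt)
        else s)
      = (fun s gname =>
        if (g.getD gname []).contains name then s.insert gname (s.getD gname 0 + amt) else s) := by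
    funext s gname
    by_cases hc : name ∈ g.getD gname []
    · by_cases hm : s.contains gname
      · simp [hc, hm]
      · have hm' : s.contains gname = false := by simpa using hm
        have h0 : s.getD gname 0 = 0 := PySem.Dict.getD_of_not_contains s 0 hm'
        simp [hc, hm', h0, PySem.Dict.getD_insert_self, PySem.Dict.insert_insert_self]
    · simp [hc]
  rw [hbody, PySem.List.foldl_if_eq_foldl_filter]
  congr 1
  -- keys filtered by "group contains name" = (items filtered).map fst
  have : g.keys = g.items.map Prod.fst := rfl
  rw [this, List.filter_map]
  congr 1
  apply List.filter_congr
  intro p hp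
  have hget : g.getD p.1 [] = p.2 :=
    PySem.Dict.getD_of_mem_items g (k := p.1) (v := p.2) (by simpa using hp) hg []
  simp [Function.comp, hget]

-- ===== VERDICT (by name: the statement is the Claim_ definition above) =====
theorem sum_objects_by_common_purpose_spec : Claim_equal_sum_objects_by_common_purpose := by
  intro inv groups _ _
  unfold Spec_sum_objects_by_common_purpose sum_objects_by_common_purpose sum_objects_by_common_purpose_alt
  simp only []
  congr 1
  rw [PySem.Dict.items_eq_map_keys (PySem.Dict.ofList inv) (PySem.Dict.nodup_keys_ofList inv) ([] : List (String × Int)),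
      List.foldl_map]
  have hfun : ∀ (s : PySem.Dict String Int) (name : String),
      (PySem.Dict.ofList (groups.getD pvDefaultGroups)).keys.foldl (fun s gname =>
        if ((PySem.Dict.ofList (groups.getD pvDefaultGroups)).getD gname []).contains name then
          let s1 := if s.contains gname then s else s.insert gname (0 : Int)
          s1.insert gname (s1.getD gname 0 +
            (PySem.Dict.ofList ((PySem.Dict.ofList inv).getD name [])).getD "amount" 0)
        else s) s
      = (((PySem.Dict.ofList (groups.getD pvDefaultGroups)).items.foldl (fun idx p =>
            (PySem.List.dedup p.2).foldl (fun idx m => idx.modify m ([] : List String) (· ++ [p.1])) idx)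
          PySem.Dict.empty).getD name []).foldl
          (fun s gname => s.insert gname (s.getD gname 0 +
            (PySem.Dict.ofList ((PySem.Dict.ofList inv).getD name [])).getD "amount" 0)) s := by
    intro s name
    rw [inner_eq _ (PySem.Dict.nodup_keys_ofList _) name, index_getD]
  simp only [hfun]
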